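-- pv_equiv track=rewrite | github.com/KelvinChung2000/FABulous | fabulous/fabric_generator/gds_generator/steps/global_tile_opitmisation.py | _find_sharing_tiles
-- ===== SOURCE A (Python) =====
-- def _find_sharing_tiles(
--     tile_name: str,
--     tile_positions: dict[str, set[int]],
-- ) -> set[str]:
--     """Find tiles sharing at least one row or column with the given tile."""
--     positions = tile_positions[tile_name]
--     return {
--         other
--         for other, other_pos in tile_positions.items()
--         if other != tile_name and positions & other_pos
--     }
-- ===== SOURCE B (Python) =====
-- def _find_sharing_tiles(tile_name, tile_positions):
--     """Inverted index: map each position to the tiles occupying it, union the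
--     buckets of the target's positions, then emit the matching tiles."""
--     positions = tile_positions[tile_name]  # KeyError on a missing tile, like A
--     index = {}
--     for other, other_pos in tile_positions.items():
--         for pos in other_pos:
--             index.setdefault(pos, []).append(other)
--     candidates = set()
--     for pos in positions:
--         candidates.update(index.get(pos, ()))
--     return {other for other in tile_positions if other != tile_name and other in candidates}
-- ===== Notes on version B (the rewrite author's own statement) =====
-- stated objective: alternative
-- what changed: A tests every tile by a set intersection with the target's positions; B builds an inverted index from each position to the tiles occupying it, unions the buckets of the target's positions into a candidate set, and emits the tiles found there.
import Mathlib
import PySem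

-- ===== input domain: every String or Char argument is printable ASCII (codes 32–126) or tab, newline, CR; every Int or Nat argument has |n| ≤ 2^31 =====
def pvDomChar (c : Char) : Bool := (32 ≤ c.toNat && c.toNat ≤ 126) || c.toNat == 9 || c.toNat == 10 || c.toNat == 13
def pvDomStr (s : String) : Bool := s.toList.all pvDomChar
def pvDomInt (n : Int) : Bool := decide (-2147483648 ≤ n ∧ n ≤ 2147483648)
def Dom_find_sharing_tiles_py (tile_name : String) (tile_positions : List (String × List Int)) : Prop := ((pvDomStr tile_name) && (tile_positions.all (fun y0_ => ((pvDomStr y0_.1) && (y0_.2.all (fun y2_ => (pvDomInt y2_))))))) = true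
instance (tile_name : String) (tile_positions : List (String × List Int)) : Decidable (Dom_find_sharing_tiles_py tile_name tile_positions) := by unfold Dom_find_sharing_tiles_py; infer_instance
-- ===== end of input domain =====

-- B replaces A's per-tile set intersections by an inverted index (position → tiles there)
-- whose buckets for the target's positions are unioned into a candidate set (objective: alternative).

-- ===== PORT A =====
def find_sharing_tiles_py (tile_name : String) (tile_positions : List (String × List Int)) : List String :=
  match (PySem.Dict.ofList tile_positions).get? tile_name with
  | none => []   -- Python raises KeyError here; excluded by Pre_
  | some positions =>
    (PySem.Dict.ofList tile_positions).items.foldl (fun acc kv =>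
      if kv.1 != tile_name && !(PySem.Set.inter (PySem.Set.ofList positions) kv.2).isEmpty
      then PySem.Set.add acc kv.1 else acc) PySem.Set.empty

-- ===== PORT B =====
def find_sharing_tiles_py_alt (tile_name : String) (tile_positions : List (String × List Int)) : List String :=
  match (PySem.Dict.ofList tile_positions).get? tile_name with
  | none => []   -- Python raises KeyError here; excluded by Pre_
  | some positions =>
    let index : PySem.Dict Int (List String) :=
      (PySem.Dict.ofList tile_positions).items.foldl (fun ix kv =>
        (PySem.Set.ofList kv.2).foldl (fun ix p => ix.modify p [] (fun b => b ++ [kv.1])) ix)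
        PySem.Dict.empty
    let candidates : PySem.Set String :=
      (PySem.Set.ofList positions).foldl (fun c p => PySem.Set.update c (index.getD p [])) PySem.Set.empty
    (PySem.Dict.ofList tile_positions).keys.foldl (fun acc k =>
      if k != tile_name && PySem.Set.contains candidates k
      then PySem.Set.add acc k else acc) PySem.Set.empty

-- ===== PRECONDITION & SPEC =====
-- Pre_ excludes exactly the inputs where Python raises KeyError: tile_name not a key of the dict.
def Pre_find_sharing_tiles_py (tile_name : String) (tile_positions : List (String × List Int)) : Prop :=
  tile_name ∈ tile_positions.map Prod.fst
instance (tile_name : String) (tile_positions : List (String × List Int)) : Decidable (Pre_find_sharing_tiles_py tile_name tile_positions) := by unfold Pre_find_sharing_tiles_py; infer_instance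
def pvWitness_find_sharing_tiles_py : String × (List (String × List Int)) :=
  ("N", [("N", [0, 1]), ("E", [1, 5]), ("W", [7])])
def Spec_find_sharing_tiles_py (tile_name : String) (tile_positions : List (String × List Int)) (out : List String) : Prop := out = find_sharing_tiles_py_alt tile_name tile_positions
instance (tile_name : String) (tile_positions : List (String × List Int)) (out : List String) : Decidable (Spec_find_sharing_tiles_py tile_name tile_positions out) := by unfold Spec_find_sharing_tiles_py; infer_instance

-- ===== CLAIM (what is proved, stated in full; the proofs are below) =====
def Claim_equal_find_sharing_tiles_py : Prop := ∀ (tile_name : String) (tile_positions : List (String × List Int)), Dom_find_sharing_tiles_py tile_name tile_positions → Pre_find_sharing_tiles_py tile_name tile_positions → Spec_find_sharing_tiles_py tile_name tile_positions (find_sharing_tiles_py tile_name tile_positions)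

-- ===== LEMMAS AND PROOFS =====

-- one tile's inner loop: position c's bucket gains the tile exactly when it holds c
theorem pv_bucket_inner (ps : List Int) (t : String) (ix : PySem.Dict Int (List String)) (c : Int)
    (hnd : ps.Nodup) :
    (ps.foldl (fun ix p => ix.modify p [] (fun b => b ++ [t])) ix).getD c []
      = ix.getD c [] ++ (if c ∈ ps then [t] else []) := by
  induction ps generalizing ix with
  | nil => simp
  | cons p ps ih =>
    simp only [List.foldl_cons]
    rw [ih _ hnd.of_cons]
    rw [PySem.Dict.getD_modify]
    rcases List.nodup_cons.mp hnd with ⟨hp, _⟩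
    by_cases hc : c = p
    · subst hc
      simp [hp]
    · simp [hc]

-- B's whole index-building loop: the bucket of c lists the tiles holding c, in items order
theorem pv_bucket (items : List (String × List Int)) (ix : PySem.Dict Int (List String)) (c : Int) :
    (items.foldl (fun ix kv =>
        (PySem.Set.ofList kv.2).foldl (fun ix p => ix.modify p [] (fun b => b ++ [kv.1])) ix) ix).getD c []
      = ix.getD c [] ++ (items.filter (fun kv => decide (c ∈ kv.2))).map Prod.fst := by
  induction items generalizing ix with
  | nil => simp
  | cons kv items ih =>
    simp only [List.foldl_cons, List.filter_cons]
    rw [ih]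
    rw [pv_bucket_inner _ _ _ _ (PySem.Set.nodup_ofList kv.2)]
    by_cases hc : c ∈ kv.2
    · simp [hc, PySem.Set.mem_ofList]
    · simp [hc, PySem.Set.mem_ofList]

theorem pv_mem_bucket (items : List (String × List Int)) (c : Int) (x : String) :
    x ∈ (items.foldl (fun ix kv =>
        (PySem.Set.ofList kv.2).foldl (fun ix p => ix.modify p [] (fun b => b ++ [kv.1])) ix)
        PySem.Dict.empty).getD c []
      ↔ ∃ ps, (x, ps) ∈ items ∧ c ∈ ps := by
  rw [pv_bucket]
  simp only [PySem.Dict.getD_empty, List.nil_append, List.mem_map, List.mem_filter]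
  constructor
  · rintro ⟨⟨y, ps⟩, ⟨hm, hc⟩, rfl⟩
    exact ⟨ps, hm, by simpa using hc⟩
  · rintro ⟨ps, hm, hc⟩
    exact ⟨(x, ps), ⟨hm, by simpa using hc⟩, rfl⟩

-- B's candidate loop: membership in a fold of set-updates
theorem pv_mem_foldl_update {α β : Type} [BEq α] [LawfulBEq α] (l : List β) (g : β → List α)
    (s : PySem.Set α) (x : α) :
    x ∈ l.foldl (fun c p => PySem.Set.update c (g p)) s ↔ x ∈ s ∨ ∃ p ∈ l, x ∈ g p := by
  induction l generalizing s with
  | nil => simp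
  | cons p l ih =>
    simp only [List.foldl_cons, ih, PySem.Set.mem_update, List.mem_cons]
    constructor
    · rintro ((h | h) | ⟨q, hq, hx⟩)
      · exact Or.inl h
      · exact Or.inr ⟨p, Or.inl rfl, h⟩
      · exact Or.inr ⟨q, Or.inr hq, hx⟩
    · rintro (h | ⟨q, (rfl | hq), hx⟩)
      · exact Or.inl (Or.inl h)
      · exact Or.inl (Or.inr hx)
      · exact Or.inr ⟨q, hq, hx⟩

-- with unique keys, the value paired with a key in items is unique
theorem pv_value_unique (d : PySem.Dict String (List Int)) (hnd : d.keys.Nodup)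
    {x : String} {ps ps' : List Int} (h : (x, ps) ∈ d.items) (h' : (x, ps') ∈ d.items) : ps = ps' := by
  have e1 := PySem.Dict.get?_of_mem_items d h hnd
  have e2 := PySem.Dict.get?_of_mem_items d h' hnd
  rw [e1] at e2
  exact Option.some.inj e2

-- ===== VERDICT (by name: the statement is the Claim_ definition above) =====
theorem find_sharing_tiles_py_spec : Claim_equal_find_sharing_tiles_py := by
  intro tile_name tile_positions _ _
  unfold Spec_find_sharing_tiles_py find_sharing_tiles_py find_sharing_tiles_py_alt
  rcases hget : (PySem.Dict.ofList tile_positions).get? tile_name with _ | positions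
  · rfl
  · dsimp only []
    rw [show (PySem.Dict.ofList tile_positions).keys
          = (PySem.Dict.ofList tile_positions).items.map Prod.fst from rfl,
        List.foldl_map]
    apply PySem.List.foldl_congr_mem
    intro acc kv hkv
    have hnd := PySem.Dict.nodup_keys_ofList (ps := tile_positions)
    have hcond : (PySem.Set.contains
        ((PySem.Set.ofList positions).foldl
          (fun c p => PySem.Set.update c
            (((PySem.Dict.ofList tile_positions).items.foldl (fun ix kv =>
              (PySem.Set.ofList kv.2).foldl (fun ix p => ix.modify p [] (fun b => b ++ [kv.1])) ix)
              PySem.Dict.empty).getD p []))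
          PySem.Set.empty) kv.1)
        = !(PySem.Set.inter (PySem.Set.ofList positions) kv.2).isEmpty := by
      rw [Bool.eq_iff_iff]
      rw [PySem.Set.contains_iff, pv_mem_foldl_update]
      rw [Bool.not_eq_eq_eq_not, Bool.not_true, List.isEmpty_eq_false_iff_exists_mem]
      constructor
      · rintro (h | ⟨p, hp, hb⟩)
        · cases h
        · rcases (pv_mem_bucket _ _ _).mp hb with ⟨ps, hm, hc⟩
          have := pv_value_unique _ hnd hm hkv
          exact ⟨p, (PySem.Set.mem_inter _ _ _).mpr ⟨hp, this ▸ hc⟩⟩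
      · rintro ⟨p, hp⟩
        rcases (PySem.Set.mem_inter _ _ _).mp hp with ⟨hp1, hp2⟩
        exact Or.inr ⟨p, hp1, (pv_mem_bucket _ _ _).mpr ⟨kv.2, hkv, hp2⟩⟩
    rw [hcond]
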